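-- pv_equiv track=rewrite | github.com/Codaily/Algorithm_Programmers | Level2/n진수 게임/soohee.py | solution
-- ===== SOURCE A (Python) =====
-- def solution(n, t, m, p):
--     answer = '0'
--     for num in range(1, t*m):
--         number = n
--         string = ""
--         while num != 0:
--             num, mod = divmod(num, number)
--
--             if number > 10 and (10 <= mod) and (mod <= 15):
--                 string += "ABCDEF"[mod%10]
--             else:
--                 string += str(mod)
--
--         answer += string[::-1]
--
--     answerArr = []
--     for i in range(p-1, t*m, m):
--         answerArr.append(answer[i])
--
--     return "".join(answerArr)
-- ===== SOURCE B (Python) =====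
-- _DIGITS = "0123456789ABCDEF"
--
--
-- def _digits(n, k):
--     d = _DIGITS[k % n]
--     return d if k < n else _digits(n, k // n) + d
--
--
-- def solution(n, t, m, p):
--     limit = t * m
--     start = p - 1
--     out = []
--     pos = 0
--     num = 0
--     while pos < limit:
--         for ch in _digits(n, num):
--             if pos < limit and pos >= start and (pos - start) % m == 0:
--                 out.append(ch)
--             pos += 1
--         num += 1
--     return "".join(out)
-- ===== Notes on version B (the rewrite author's own statement) =====
-- stated objective: alternative
-- what changed: B streams the base-n digits of 0,1,2,... in a single pass with a running position counter, emitting exactly the characters at positions p-1, p-1+m, ... and stopping once position t*m is reached, instead of A's build-the-whole-concatenated-string (per-number LSB-first digit loop plus string reversal) followed by a second indexing loop; B never materialises the t*m-character string.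
-- outside the precondition, e.g. on solution(20, 2, 11, 1): A returns '0B', B raises IndexError; on solution(2, 1, 1, 0): A returns '00', B returns '0'
import Mathlib
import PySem

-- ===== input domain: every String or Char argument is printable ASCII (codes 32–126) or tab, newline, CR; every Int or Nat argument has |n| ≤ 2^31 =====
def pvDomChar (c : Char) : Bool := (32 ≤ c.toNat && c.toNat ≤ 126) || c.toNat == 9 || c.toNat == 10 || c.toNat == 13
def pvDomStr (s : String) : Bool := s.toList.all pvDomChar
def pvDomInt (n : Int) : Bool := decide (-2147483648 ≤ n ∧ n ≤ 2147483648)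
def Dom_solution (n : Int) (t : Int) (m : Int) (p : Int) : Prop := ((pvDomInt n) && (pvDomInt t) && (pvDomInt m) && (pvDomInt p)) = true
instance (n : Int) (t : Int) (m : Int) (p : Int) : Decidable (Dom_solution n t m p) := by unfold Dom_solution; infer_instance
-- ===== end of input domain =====

-- B replaces A's build-the-whole-string-then-index-it scheme by a single streaming pass over the
-- base-n digits of 0,1,2,… that emits exactly the wanted positions (objective: alternative).

-- ===== PORT A =====
def pyHEXLETTERS : List Char := ['A', 'B', 'C', 'D', 'E', 'F']

-- one body of A's while loop: the characters appended for remainder `md` ("ABCDEF"[mod%10] or str(mod))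
def pyCharsA (n md : Int) : List Char :=
  if 10 < n ∧ 10 ≤ md ∧ md ≤ 15 then
    [PySem.List.pyGetD pyHEXLETTERS (PySem.Int.mod md 10) '?']
  else PySem.Int.toChars md

-- A's `while num != 0` loop, LSB-first; fuel num.toNat + 2 bounds the iteration count (digits ≤ num + 2)
def repA (n : Int) : Nat → Int → List Char → List Char
  | 0, _, s => s
  | f + 1, num, s =>
    if num = 0 then s
    else repA n f (PySem.Int.floordiv num n) (s ++ pyCharsA n (PySem.Int.mod num n))

-- answer[i] raises IndexError when out of range; Pre_ keeps every index in range, so pyGetD's default is never read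
def solution (n : Int) (t : Int) (m : Int) (p : Int) : String :=
  let answer : List Char :=
    (PySem.List.pyRange 1 (t * m) 1).foldl
      (fun ans num => ans ++ (repA n (num.toNat + 2) num []).reverse) ['0']
  String.ofList
    ((PySem.List.pyRange (p - 1) (t * m) m).foldl
      (fun acc i => acc ++ [PySem.List.pyGetD answer i '?']) [])

-- ===== PORT B =====
def pyDIGITS : List Char := ['0','1','2','3','4','5','6','7','8','9','A','B','C','D','E','F']

-- _DIGITS[k % n]; Python raises IndexError for k % n ≥ 16, excluded by Pre_ (n ≤ 16)
def digB (n k : Int) : Char := PySem.List.pyGetD pyDIGITS (PySem.Int.mod k n) '?'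

-- Source B's recursive _digits, MSB-first; fuel k.toNat+1 bounds the recursion depth
def digitsB (n : Int) : Nat → Int → List Char
  | 0, _ => []
  | f + 1, k => if k < n then [digB n k] else digitsB n f (PySem.Int.floordiv k n) ++ [digB n k]

-- one step of Source B's inner `for ch in _digits(n, num)` loop over the state (out, pos)
def stepB (limit start m : Int) (st : List Char × Int) (ch : Char) : List Char × Int :=
  ((if st.2 < limit ∧ start ≤ st.2 ∧ PySem.Int.mod (st.2 - start) m = 0 then st.1 ++ [ch] else st.1),
   st.2 + 1)

-- Source B's outer `while pos < limit` loop; fuel (t*m).toNat bounds the iteration count (pos grows by ≥ 1)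
def loopB (n limit start m : Int) : Nat → Int → Int → List Char → List Char
  | 0, _, _, out => out
  | f + 1, pos, num, out =>
    if pos < limit then
      let st := (digitsB n (num.toNat + 1) num).foldl (stepB limit start m) (out, pos)
      loopB n limit start m f st.2 (num + 1) st.1
    else out

def solution_alt (n : Int) (t : Int) (m : Int) (p : Int) : String :=
  String.ofList (loopB n (t * m) (p - 1) m (t * m).toNat 0 0 [])

-- ===== PRECONDITION & SPEC =====
-- Pre_ restricts to the problem's natural domain (the Programmers task states 2 ≤ n ≤ 16, m ≥ 1, p ≥ 1;
-- the degenerate t ≤ 0, where both loops are empty and n is never touched, is admitted for every n):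
-- outside it A loops forever (n ∈ {-1,1} with t*m ≥ 2), raises (n = 0; m = 0), or returns accidental values
-- (n > 16: multi-character decimal strings spliced into the digit stream, where B's digit lookup raises
-- IndexError; p ≤ 0: Python negative-index wraparound), none of which is the function's intent.
def Pre_solution (n : Int) (t : Int) (m : Int) (p : Int) : Prop :=
  1 ≤ m ∧ 1 ≤ p ∧ (t ≤ 0 ∨ (2 ≤ n ∧ n ≤ 16))
instance (n : Int) (t : Int) (m : Int) (p : Int) : Decidable (Pre_solution n t m p) := by
  unfold Pre_solution; infer_instance

def pvWitness_solution : Int × Int × Int × Int := (2, 3, 2, 1)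

def Spec_solution (n : Int) (t : Int) (m : Int) (p : Int) (out : String) : Prop := out = solution_alt n t m p
instance (n : Int) (t : Int) (m : Int) (p : Int) (out : String) : Decidable (Spec_solution n t m p out) := by unfold Spec_solution; infer_instance

-- ===== CLAIM (what is proved, stated in full; the proofs are below) =====
def Claim_equal_solution : Prop := ∀ (n : Int) (t : Int) (m : Int) (p : Int), Dom_solution n t m p → Pre_solution n t m p → Spec_solution n t m p (solution n t m p)

-- ===== LEMMAS AND PROOFS =====

-- list of characters whose positions both programs talk about: base-n digits of 0,1,…,N-1 concatenated
def pvDg (n k : Int) : List Char := digitsB n (k.toNat + 1) k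

def pvL (n N : Int) : List Char := (PySem.List.pyRange 0 N 1).flatMap (pvDg n)

-- B's inner for-loop as a structural recursion on the character list
def pvChew (limit s m : Int) : List Char → Int → List Char → List Char
  | [], _, out => out
  | c :: cs, pos, out =>
      pvChew limit s m cs (pos + 1)
        (if pos < limit ∧ s ≤ pos ∧ PySem.Int.mod (pos - s) m = 0 then out ++ [c] else out)

lemma pvFoldl_stepB (limit s m : Int) : ∀ (ds out : List Char) (pos : Int),
    ds.foldl (stepB limit s m) (out, pos) = (pvChew limit s m ds pos out, pos + ds.length) := by
  intro ds
  induction ds with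
  | nil => intro out pos; simp [pvChew]
  | cons c cs ih =>
      intro out pos
      simp only [List.foldl_cons, stepB, pvChew, ih, List.length_cons]
      rw [Prod.mk.injEq]
      refine ⟨rfl, by push_cast; ring⟩

lemma pvChew_ge (limit s m : Int) : ∀ (ds : List Char) (pos : Int) (out : List Char),
    limit ≤ pos → pvChew limit s m ds pos out = out := by
  intro ds
  induction ds with
  | nil => intro pos out _; rfl
  | cons c cs ih =>
      intro pos out h
      rw [pvChew, if_neg (by omega : ¬(pos < limit ∧ s ≤ pos ∧ PySem.Int.mod (pos - s) m = 0))]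
      exact ih (pos + 1) out (by omega)

lemma pvChew_append (limit s m : Int) : ∀ (a b : List Char) (pos : Int) (out : List Char),
    pvChew limit s m (a ++ b) pos out = pvChew limit s m b (pos + a.length) (pvChew limit s m a pos out) := by
  intro a
  induction a with
  | nil => intro b pos out; simp [pvChew]
  | cons c cs ih =>
      intro b pos out
      simp only [List.cons_append, pvChew, ih, List.length_cons]
      congr 1
      push_cast; ring

lemma digitsB_succ_ne_nil (n : Int) (f : Nat) (k : Int) : digitsB n (f + 1) k ≠ [] := by
  rw [digitsB]; split_ifs <;> simp

lemma digitsB_fuel (n : Int) (h2 : 2 ≤ n) : ∀ (f g : Nat) (k : Int), 0 ≤ k →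
    k.toNat < f → k.toNat < g → digitsB n f k = digitsB n g k := by
  intro f
  induction f with
  | zero => intro g k _ hf _; omega
  | succ f ih =>
      intro g k hk hf hg
      obtain ⟨g', rfl⟩ : ∃ g', g = g' + 1 := ⟨g - 1, by omega⟩
      rw [digitsB, digitsB]
      by_cases hkn : k < n
      · simp [hkn]
      · rw [if_neg hkn, if_neg hkn]
        have hq0 : 0 ≤ PySem.Int.floordiv k n :=
          (PySem.Int.le_floordiv_iff_mul_le (by omega)).mpr (by omega)
        have hqlt : PySem.Int.floordiv k n < k :=
          (PySem.Int.floordiv_lt_iff_lt_mul (by omega)).mpr (by nlinarith)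
        rw [ih g' (PySem.Int.floordiv k n) hq0 (by omega) (by omega)]

lemma pvDg_ne_nil (n k : Int) : pvDg n k ≠ [] := digitsB_succ_ne_nil n k.toNat k

lemma pvDg_lt (n k : Int) (hk : k < n) : pvDg n k = [digB n k] := by
  rw [pvDg, digitsB, if_pos hk]

lemma pvDg_ge (n k : Int) (h2 : 2 ≤ n) (hk : n ≤ k) :
    pvDg n k = pvDg n (PySem.Int.floordiv k n) ++ [digB n k] := by
  rw [pvDg, digitsB, if_neg (by omega : ¬ k < n), pvDg]
  have hq0 : 0 ≤ PySem.Int.floordiv k n :=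
    (PySem.Int.le_floordiv_iff_mul_le (by omega)).mpr (by omega)
  have hqlt : PySem.Int.floordiv k n < k :=
    (PySem.Int.floordiv_lt_iff_lt_mul (by omega)).mpr (by nlinarith)
  rw [digitsB_fuel n h2 k.toNat ((PySem.Int.floordiv k n).toNat + 1) _ hq0 (by omega) (by omega)]

lemma pvDg_zero (n : Int) (h2 : 2 ≤ n) : pvDg n 0 = ['0'] := by
  rw [pvDg_lt n 0 (by omega), digB]
  have h0 : PySem.Int.mod 0 n = 0 := by
    rw [PySem.Int.mod_eq_emod_of_pos (by omega)]; simp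
  rw [h0]
  rfl

lemma pyCharsA_eq (n k : Int) (h2 : 2 ≤ n) (h16 : n ≤ 16) (h0 : 0 ≤ k) (hk : k < n) :
    pyCharsA n k = [PySem.List.pyGetD pyDIGITS k '?'] := by
  by_cases h10 : 10 ≤ k
  · rw [pyCharsA, if_pos ⟨by omega, h10, by omega⟩]
    have h15 : k ≤ 15 := by omega
    interval_cases k <;> decide
  · rw [pyCharsA, if_neg (by omega : ¬(10 < n ∧ 10 ≤ k ∧ k ≤ 15))]
    have h9 : k ≤ 9 := by omega
    interval_cases k <;> decide

lemma repA_zero (n : Int) : ∀ (f : Nat) (acc : List Char), repA n f 0 acc = acc := by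
  intro f acc; cases f <;> simp [repA]

lemma repA_eq (n : Int) (h2 : 2 ≤ n) (h16 : n ≤ 16) :
    ∀ (f : Nat) (k : Int) (acc : List Char), 1 ≤ k → k.toNat ≤ f →
      repA n f k acc = acc ++ (pvDg n k).reverse := by
  intro f
  induction f with
  | zero => intro k acc h1 hf; omega
  | succ f ih =>
      intro k acc h1 hf
      rw [repA, if_neg (by omega : ¬ k = 0)]
      have hmd0 : 0 ≤ PySem.Int.mod k n := PySem.Int.mod_nonneg k (by omega)
      have hmdn : PySem.Int.mod k n < n := PySem.Int.mod_lt k (by omega)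
      by_cases hkn : k < n
      · have hq : PySem.Int.floordiv k n = 0 := by
          rw [PySem.Int.floordiv_eq_ediv_of_pos (by omega)]
          exact Int.ediv_eq_zero_of_lt (by omega) hkn
        have hmd : PySem.Int.mod k n = k := by
          rw [PySem.Int.mod_eq_emod_of_pos (by omega)]
          exact Int.emod_eq_of_lt (by omega) hkn
        rw [hq, repA_zero, pvDg_lt n k hkn, hmd,
            pyCharsA_eq n k h2 h16 (by omega) hkn, digB, hmd]
        simp
      · have hq1 : 1 ≤ PySem.Int.floordiv k n :=
          (PySem.Int.le_floordiv_iff_mul_le (by omega)).mpr (by omega)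
        have hqlt : PySem.Int.floordiv k n < k :=
          (PySem.Int.floordiv_lt_iff_lt_mul (by omega)).mpr (by nlinarith)
        rw [ih (PySem.Int.floordiv k n) _ hq1 (by omega),
            pyCharsA_eq n _ h2 h16 hmd0 hmdn,
            pvDg_ge n k h2 (by omega)]
        rw [digB]
        simp

lemma pvAnswer_eq (n N : Int) (h2 : 2 ≤ n) (h16 : n ≤ 16) (hN : 1 ≤ N) :
    (PySem.List.pyRange 1 N 1).foldl
      (fun ans num => ans ++ (repA n (num.toNat + 2) num []).reverse) ['0'] = pvL n N := by
  have hcong : ∀ (acc : List Char), ∀ x ∈ PySem.List.pyRange 1 N 1,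
      acc ++ (repA n (x.toNat + 2) x []).reverse = acc ++ pvDg n x := by
    intro acc x hx
    have hx1 : 1 ≤ x := ((PySem.List.mem_pyRange_one).mp hx).1
    rw [repA_eq n h2 h16 (x.toNat + 2) x [] hx1 (by omega)]
    simp
  rw [PySem.List.foldl_congr_mem (PySem.List.pyRange 1 N 1) _
        (fun ans num => ans ++ pvDg n num) ['0'] hcong]
  rw [PySem.List.foldl_append_eq_flatMap]
  rw [pvL, PySem.List.pyRange_one_cons (by omega : (0:Int) < N)]
  simp [pvDg_zero n h2]

lemma pvFlatMap_len_ge (g : Int → List Char) : ∀ (ks : List Int),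
    (∀ k ∈ ks, g k ≠ []) → ks.length ≤ (ks.flatMap g).length := by
  intro ks
  induction ks with
  | nil => intro _; simp
  | cons k ks ih =>
      intro h
      have h1 : 1 ≤ (g k).length := List.length_pos_iff.mpr (h k (by simp))
      have h2 := ih (fun x hx => h x (by simp [hx]))
      simp only [List.flatMap_cons, List.length_append, List.length_cons]
      omega

lemma pvL_len (n N : Int) : N.toNat ≤ (pvL n N).length := by
  have := pvFlatMap_len_ge (pvDg n) (PySem.List.pyRange 0 N 1)
    (fun k _ => pvDg_ne_nil n k)
  rwa [PySem.List.length_pyRange_one, sub_zero] at this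

lemma pvLoopB_eq (n N s m : Int) :
    ∀ (f : Nat) (num pos : Int) (out : List Char), 0 ≤ num → num ≤ pos → (N - num).toNat ≤ f →
      loopB n N s m f pos num out
        = pvChew N s m ((PySem.List.pyRange num N 1).flatMap (pvDg n)) pos out := by
  intro f
  induction f with
  | zero =>
      intro num pos out h0 hle hf
      rw [loopB, PySem.List.pyRange_one_eq_nil (by omega : N ≤ num)]
      rfl
  | succ f ih =>
      intro num pos out h0 hle hf
      rw [loopB]
      by_cases hpos : pos < N
      · rw [if_pos hpos]
        have hnum : num < N := by omega
        rw [PySem.List.pyRange_one_cons hnum, List.flatMap_cons, pvChew_append]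
        show loopB n N s m f ((pvDg n num).foldl (stepB N s m) (out, pos)).2 (num + 1)
              ((pvDg n num).foldl (stepB N s m) (out, pos)).1 = _
        rw [pvFoldl_stepB]
        have hlen : 1 ≤ (pvDg n num).length := List.length_pos_iff.mpr (pvDg_ne_nil n num)
        exact ih (num + 1) (pos + (pvDg n num).length) _ (by omega) (by omega) (by omega)
      · rw [if_neg hpos]
        exact (pvChew_ge N s m _ pos out (by omega)).symm

lemma pvPairwise_pyRange (s N m : Int) (hm : 0 < m) :
    (PySem.List.pyRange s N m).Pairwise (· < ·) := by
  rw [PySem.List.pyRange_of_pos s N hm]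
  rw [List.pairwise_map]
  exact (List.pairwise_lt_range).imp (by
    intro a b hab
    have : (m : Int) * a < m * b := by
      apply mul_lt_mul_of_pos_left _ hm
      exact_mod_cast hab
    omega)

lemma pvFilter_split (pos : Int) : ∀ (xs : List Int), xs.Pairwise (· < ·) →
    xs.filter (fun i => decide (pos ≤ i))
      = (if pos ∈ xs then [pos] else []) ++ xs.filter (fun i => decide (pos + 1 ≤ i)) := by
  intro xs
  induction xs with
  | nil => intro _; simp
  | cons h t ih =>
      intro hp
      have hpt := (List.pairwise_cons.mp hp).1
      have hpt' := (List.pairwise_cons.mp hp).2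
      rcases lt_trichotomy h pos with hlt | rfl | hgt
      · rw [List.filter_cons_of_neg (by simp; omega), List.filter_cons_of_neg (by simp; omega),
            ih hpt']
        have hiff : (pos ∈ h :: t) ↔ pos ∈ t :=
          ⟨fun hh => (List.mem_cons.mp hh).resolve_left (by omega),
           fun hh => List.mem_cons_of_mem _ hh⟩
        simp only [hiff]
      · rw [List.filter_cons_of_pos (by simp), List.filter_cons_of_neg (by simp),
            if_pos List.mem_cons_self]
        simp only [List.singleton_append, List.cons.injEq, true_and]
        apply List.filter_congr
        intro x hx
        have := hpt x hx
        rw [decide_eq_decide]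
        constructor <;> intro <;> omega
      · have hmem : pos ∉ h :: t := by
          intro hc
          rcases List.mem_cons.mp hc with rfl | hc'
          · omega
          · exact absurd (hpt pos hc') (by omega)
        rw [if_neg hmem, List.filter_cons_of_pos (by simp; omega),
            List.filter_cons_of_pos (by simp; omega), List.nil_append]
        simp only [List.cons.injEq, true_and]
        apply List.filter_congr
        intro x hx
        have := hpt x hx
        rw [decide_eq_decide]
        constructor <;> intro <;> omega

lemma pvGetD_cons_shift (c : Char) (cs : List Char) (j : Int) (d : Char)
    (h1 : 1 ≤ j) (hlen : j ≤ (cs.length : Int)) :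
    PySem.List.pyGetD (c :: cs) j d = PySem.List.pyGetD cs (j - 1) d := by
  rw [PySem.List.pyGetD_eq_getElem (c :: cs) d (by omega) (by simp; omega),
      PySem.List.pyGetD_eq_getElem cs d (by omega) (by omega)]
  have hj : j.toNat = (j - 1).toNat + 1 := by omega
  simp only [hj, List.getElem_cons_succ]

lemma pvChew_spec (N s m : Int) (hm : 0 < m) :
    ∀ (Lc : List Char) (pos : Int) (out : List Char), 0 ≤ pos → N ≤ pos + Lc.length →
      pvChew N s m Lc pos out
        = out ++ ((PySem.List.pyRange s N m).filter (fun i => decide (pos ≤ i))).map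
                   (fun i => PySem.List.pyGetD Lc (i - pos) '?') := by
  intro Lc
  induction Lc with
  | nil =>
      intro pos out h0 hN
      have hfil : (PySem.List.pyRange s N m).filter (fun i => decide (pos ≤ i)) = [] := by
        apply List.filter_eq_nil_iff.mpr
        intro i hi
        have := (PySem.List.mem_pyRange_iff_of_pos hm i).mp hi
        simp only [List.length_nil, Nat.cast_zero, add_zero] at hN
        simp only [decide_eq_true_eq]
        omega
      rw [hfil]
      simp [pvChew]
  | cons c cs ih =>
      intro pos out h0 hN
      have hN' : N ≤ (pos + 1) + (cs.length : Int) := by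
        simp only [List.length_cons] at hN
        push_cast at hN ⊢
        omega
      rw [pvChew, ih (pos + 1) _ (by omega) hN']
      rw [pvFilter_split pos _ (pvPairwise_pyRange s N m hm)]
      have hmem : pos ∈ PySem.List.pyRange s N m
          ↔ (pos < N ∧ s ≤ pos ∧ PySem.Int.mod (pos - s) m = 0) := by
        rw [PySem.List.mem_pyRange_iff_of_pos hm, PySem.Int.mod_eq_zero_iff_dvd]
        tauto
      have htail : ∀ i ∈ (PySem.List.pyRange s N m).filter (fun i => decide (pos + 1 ≤ i)),
          PySem.List.pyGetD cs (i - (pos + 1)) '?' = PySem.List.pyGetD (c :: cs) (i - pos) '?' := by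
        intro i hi
        have hi1 : pos + 1 ≤ i := by
          have := List.of_mem_filter hi
          simpa using this
        have hiN : i < N := ((PySem.List.mem_pyRange_iff_of_pos hm i).mp (List.mem_of_mem_filter hi)).2.1
        rw [pvGetD_cons_shift c cs (i - pos) '?' (by omega) (by omega)]
        congr 1
        omega
      by_cases hc : pos < N ∧ s ≤ pos ∧ PySem.Int.mod (pos - s) m = 0
      · rw [if_pos hc, if_pos (hmem.mpr hc)]
        rw [List.map_append, List.map_singleton, sub_self]
        rw [List.map_congr_left htail]
        simp [PySem.List.pyGetD_zero_cons]
      · rw [if_neg hc, if_neg (fun h => hc (hmem.mp h))]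
        rw [List.map_congr_left htail]
        simp

-- ===== VERDICT (by name: the statement is the Claim_ definition above) =====
theorem solution_spec : Claim_equal_solution := by
  intro n t m p _ hpre
  obtain ⟨hm, hp, hnt⟩ := hpre
  simp only [Spec_solution, solution, solution_alt]
  by_cases hN : t * m ≤ 0
  · rw [PySem.List.pyRange_one_eq_nil (by omega : t * m ≤ 1)]
    have hr : PySem.List.pyRange (p - 1) (t * m) m = [] := by
      rw [PySem.List.pyRange_of_pos _ _ (by omega : (0:Int) < m),
          if_neg (by omega : ¬ p - 1 < t * m)]
      simp
    rw [hr]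
    have hf : (t * m).toNat = 0 := by omega
    rw [hf]
    rfl
  · obtain ⟨h2, h16⟩ : 2 ≤ n ∧ n ≤ 16 := by
      rcases hnt with ht | h
      · exact absurd (by nlinarith : t * m ≤ 0) hN
      · exact h
    rw [pvAnswer_eq n (t * m) h2 h16 (by omega)]
    rw [PySem.List.foldl_append_singleton_eq_map]
    rw [pvLoopB_eq n (t * m) (p - 1) m (t * m).toNat 0 0 [] le_rfl le_rfl (by omega)]
    have hlen : (t * m : Int) ≤ (0 : Int) + ((pvL n (t * m)).length : Int) := by
      have := pvL_len n (t * m)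
      omega
    rw [show List.flatMap (pvDg n) (PySem.List.pyRange 0 (t * m) 1) = pvL n (t * m) from rfl]
    rw [pvChew_spec (t * m) (p - 1) m (by omega) (pvL n (t * m)) 0 [] le_rfl hlen]
    have hfil : (PySem.List.pyRange (p - 1) (t * m) m).filter (fun i => decide ((0:Int) ≤ i))
        = PySem.List.pyRange (p - 1) (t * m) m := by
      apply List.filter_eq_self.mpr
      intro i hi
      have := (PySem.List.mem_pyRange_iff_of_pos (by omega : (0:Int) < m) i).mp hi
      simp only [decide_eq_true_eq]
      omega
    rw [hfil]
    simp
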